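-- pv_equiv track=rewrite | github.com/Git-Ansh/maccp-conformal-triage-qrs2026 | src/legacy_phases/phase_4/src/evaluation.py | match_detected_to_true
-- ===== SOURCE A (Python) =====
-- from typing import List, Dict, Tuple, Optional
--
-- def match_detected_to_true(
--     detected: List[int],
--     true_points: List[int],
--     tolerance: int = 5
-- ) -> Tuple[List[Tuple[int, int]], List[int], List[int]]:
--     """
--     Match detected change points to true change points.
--
--     Args:
--         detected: List of detected change point indices
--         true_points: List of true change point indices
--         tolerance: Maximum distance for a match
--
--     Returns:
--         Tuple of (matches, unmatched_detected, unmatched_true)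
--     """
--     matches = []
--     unmatched_detected = list(detected)
--     unmatched_true = list(true_points)
--
--     for true_cp in true_points:
--         best_match = None
--         best_dist = float('inf')
--
--         for det_cp in unmatched_detected:
--             dist = abs(det_cp - true_cp)
--             if dist <= tolerance and dist < best_dist:
--                 best_match = det_cp
--                 best_dist = dist
--
--         if best_match is not None:
--             matches.append((true_cp, best_match))
--             unmatched_detected.remove(best_match)
--             unmatched_true.remove(true_cp)
--
--     return matches, unmatched_detected, unmatched_true
-- ===== SOURCE B (Python) =====
-- def _bisect_left(a, x):
--     # classic binary search: first position p with a[p] >= x (a sorted ascending)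
--     lo, hi = 0, len(a)
--     while lo < hi:
--         mid = (lo + hi) // 2
--         if a[mid] < x:
--             lo = mid + 1
--         else:
--             hi = mid
--     return lo
--
--
-- def match_detected_to_true(detected, true_points, tolerance=5):
--     # index lists per distinct detected value (ascending original indices)
--     occ = {}
--     for i, v in enumerate(detected):
--         occ.setdefault(v, []).append(i)
--     vals = sorted(occ)            # distinct values still having an unused occurrence
--     used = {}                     # value -> number of matched occurrences
--     taken = {}                    # true value -> number of matched occurrences
--     matches = []
--     for t in true_points:
--         pos = _bisect_left(vals, t)
--         best = None
--         if pos < len(vals) and abs(vals[pos] - t) <= tolerance: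
--             best = vals[pos]
--         if pos > 0:
--             lo = vals[pos - 1]
--             if abs(lo - t) <= tolerance and (
--                 best is None
--                 or abs(lo - t) < abs(best - t)
--                 or (abs(lo - t) == abs(best - t)
--                     and occ[lo][used.get(lo, 0)] < occ[best][used.get(best, 0)])
--             ):
--                 best = lo
--         if best is not None:
--             matches.append((t, best))
--             u = used.get(best, 0) + 1
--             used[best] = u
--             if u == len(occ[best]):
--                 vals.remove(best)
--             taken[t] = taken.get(t, 0) + 1
--     unmatched_detected = []
--     rem = dict(used)
--     for v in detected:
--         k = rem.get(v, 0)
--         if k > 0: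
--             rem[v] = k - 1
--         else:
--             unmatched_detected.append(v)
--     unmatched_true = []
--     ttk = dict(taken)
--     for t in true_points:
--         k = ttk.get(t, 0)
--         if k > 0:
--             ttk[t] = k - 1
--         else:
--             unmatched_true.append(t)
--     return matches, unmatched_detected, unmatched_true
-- ===== Notes on version B (the rewrite author's own statement) =====
-- stated objective: faster
-- what changed: Replaces the per-true-point linear scan over the remaining detected list with a sorted list of distinct detected values queried by hand-written binary search (the nearest remaining value is one of the two bisection neighbours), per-value occurrence-index lists for A's first-in-list tie-break, and match counters from which both unmatched lists are reconstructed in single passes.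
import Mathlib
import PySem

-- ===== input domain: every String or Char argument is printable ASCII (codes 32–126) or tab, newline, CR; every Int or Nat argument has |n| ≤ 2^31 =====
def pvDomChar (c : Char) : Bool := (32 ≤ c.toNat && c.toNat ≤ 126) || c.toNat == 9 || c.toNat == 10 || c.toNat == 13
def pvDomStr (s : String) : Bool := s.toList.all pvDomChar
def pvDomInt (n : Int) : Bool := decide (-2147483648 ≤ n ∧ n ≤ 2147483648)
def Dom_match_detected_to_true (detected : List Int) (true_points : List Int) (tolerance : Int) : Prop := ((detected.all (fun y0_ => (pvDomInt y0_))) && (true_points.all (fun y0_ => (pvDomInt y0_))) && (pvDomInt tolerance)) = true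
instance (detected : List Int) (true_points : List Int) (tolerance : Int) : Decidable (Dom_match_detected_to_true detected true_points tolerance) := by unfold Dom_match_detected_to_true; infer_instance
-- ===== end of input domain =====

-- B replaces A's per-true-point linear scan of the remaining detected list by binary search in a
-- sorted list of distinct detected values (with per-value occurrence-index lists for A's
-- first-in-list tie-break and counters from which both unmatched lists are rebuilt); objective: faster.

-- ===== PORT A =====
-- inner loop over unmatched_detected; `none` plays the role of best_match = None / best_dist = inf
def mdtScan (t tol : Int) : List Int → Option (Int × Int) → Option (Int × Int)
  | [], best => best
  | d :: rest, best =>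
      if (decide (|d - t| ≤ tol) && (match best with
            | none => true
            | some (_, bd) => decide (|d - t| < bd))) then
        mdtScan t tol rest (some (d, |d - t|))
      else mdtScan t tol rest best

-- list.remove(x): drops the first occurrence; x is present at every call site, so no ValueError arises
def mdtRemove (x : Int) : List Int → List Int
  | [] => []
  | y :: ys => if y = x then ys else y :: mdtRemove x ys

def mdtLoop (tol : Int) : List Int → List (Int × Int) → List Int → List Int → (List (Int × Int)) × List Int × List Int
  | [], ms, ud, ut => (ms, ud, ut)
  | t :: ts, ms, ud, ut =>
    match mdtScan t tol ud none with
    | none => mdtLoop tol ts ms ud ut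
    | some (b, _) => mdtLoop tol ts (ms ++ [(t, b)]) (mdtRemove b ud) (mdtRemove t ut)

def match_detected_to_true (detected : List Int) (true_points : List Int) (tolerance : Int) : (List (Int × Int)) × List Int × List Int :=
  mdtLoop tolerance true_points [] detected true_points

-- ===== PORT B =====
-- occ.setdefault(v, []).append(i) over enumerate(detected)
def altBuildOcc : List (Int × Int) → PySem.Dict Int (List Int) → PySem.Dict Int (List Int)
  | [], occ => occ
  | (i, v) :: rest, occ => altBuildOcc rest (occ.insert v (occ.getD v [] ++ [i]))

-- occ[v][used.get(v, 0)] (in range at every call site: used[v] < len(occ[v]) for v in vals)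
def altFIdx (occ : PySem.Dict Int (List Int)) (used : PySem.Dict Int Int) (v : Int) : Int :=
  (occ.getD v []).getD (used.getD v 0).toNat 0

-- one iteration's candidate selection: bisect, then the two neighbours
def altPick (tol t : Int) (occ : PySem.Dict Int (List Int)) (used : PySem.Dict Int Int) (vals : List Int) : Option Int :=
  let pos := PySem.List.bisectLeft vals t
  let best0 : Option Int :=
    if pos < vals.length ∧ |vals.getD pos 0 - t| ≤ tol then some (vals.getD pos 0) else none
  if 0 < pos then
    let lo := vals.getD (pos - 1) 0
    let improves : Bool := match best0 with
      | none => true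
      | some b => decide (|lo - t| < |b - t|) ||
          (decide (|lo - t| = |b - t|) && decide (altFIdx occ used lo < altFIdx occ used b))
    if decide (|lo - t| ≤ tol) && improves then some lo else best0
  else best0

def altLoop (tol : Int) (occ : PySem.Dict Int (List Int)) :
    List Int → List (Int × Int) → PySem.Dict Int Int → PySem.Dict Int Int → List Int →
    List (Int × Int) × PySem.Dict Int Int × PySem.Dict Int Int × List Int
  | [], ms, used, taken, vals => (ms, used, taken, vals)
  | t :: ts, ms, used, taken, vals =>
    match altPick tol t occ used vals with
    | none => altLoop tol occ ts ms used taken vals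
    | some b =>
      let u := used.getD b 0 + 1
      let used' := used.insert b u
      -- vals.remove(best): best is in vals at this point, so no ValueError arises
      let vals' := if u = ((occ.getD b []).length : Int) then (PySem.List.remove? vals b).getD vals else vals
      let taken' := taken.insert t (taken.getD t 0 + 1)
      altLoop tol occ ts (ms ++ [(t, b)]) used' taken' vals'

-- final rebuild pass: skip the first cnt[v] occurrences of each matched value
def altPass : List Int → PySem.Dict Int Int → List Int → PySem.Dict Int Int × List Int
  | [], rem, acc => (rem, acc)
  | v :: vs, rem, acc =>
    let k := rem.getD v 0
    if 0 < k then altPass vs (rem.insert v (k - 1)) acc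
    else altPass vs rem (acc ++ [v])

def match_detected_to_true_alt (detected : List Int) (true_points : List Int) (tolerance : Int) : (List (Int × Int)) × List Int × List Int :=
  let occ := altBuildOcc (PySem.List.enumerate detected 0) PySem.Dict.empty
  let vals := PySem.List.sorted occ.keys (fun x => x) false
  match altLoop tolerance occ true_points [] PySem.Dict.empty PySem.Dict.empty vals with
  | (ms, used, taken, _) =>
    (ms, (altPass detected used []).2, (altPass true_points taken []).2)

-- ===== PRECONDITION & SPEC =====
def Spec_match_detected_to_true (detected : List Int) (true_points : List Int) (tolerance : Int) (out : (List (Int × Int)) × List Int × List Int) : Prop := out = match_detected_to_true_alt detected true_points tolerance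
instance (detected : List Int) (true_points : List Int) (tolerance : Int) (out : (List (Int × Int)) × List Int × List Int) : Decidable (Spec_match_detected_to_true detected true_points tolerance out) := by unfold Spec_match_detected_to_true; infer_instance

-- ===== CLAIM (what is proved, stated in full; the proofs are below) =====
def Claim_equal_match_detected_to_true : Prop := ∀ (detected : List Int) (true_points : List Int) (tolerance : Int), Dom_match_detected_to_true detected true_points tolerance → Spec_match_detected_to_true detected true_points tolerance (match_detected_to_true detected true_points tolerance)

-- ===== LEMMAS AND PROOFS =====

-- counter bump / drop at one value
def pvInc (f : Int → Int) (x : Int) : Int → Int := fun y => if y = x then f y + 1 else f y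
def pvDec (f : Int → Int) (x : Int) : Int → Int := fun y => if y = x then f y - 1 else f y

-- drop the first (f v) occurrences of each value v
def pvDrop (f : Int → Int) : List Int → List Int
  | [] => []
  | x :: xs => if 0 < f x then pvDrop (pvDec f x) xs else x :: pvDrop f xs

-- indices (starting at s) of the occurrences of v in a list
def pvOcc (s : Int) : List Int → Int → List Int
  | [], _ => []
  | x :: xs, v => if x = v then s :: pvOcc (s + 1) xs v else pvOcc (s + 1) xs v

-- first element with minimal |·-t| among those within tolerance
def pvFM (t tol : Int) : List Int → Option Int
  | [] => none
  | x :: xs =>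
    if |x - t| ≤ tol then
      some (match pvFM t tol xs with
        | none => x
        | some y => if |y - t| < |x - t| then y else x)
    else pvFM t tol xs

lemma pvInc_apply (f : Int → Int) (x y : Int) : pvInc f x y = if y = x then f y + 1 else f y := rfl
lemma pvDec_apply (f : Int → Int) (x y : Int) : pvDec f x y = if y = x then f y - 1 else f y := rfl

lemma pvDec_nonneg (f : Int → Int) (x : Int) (hf : ∀ v, 0 ≤ f v) (hx : 0 < f x) :
    ∀ v, 0 ≤ pvDec f x v := by
  intro v
  rw [pvDec_apply]
  rcases eq_or_ne v x with rfl | hv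
  · rw [if_pos rfl]; omega
  · rw [if_neg hv]; exact hf v

lemma pvDrop_zero (L : List Int) (f : Int → Int) (h : ∀ v, f v = 0) : pvDrop f L = L := by
  induction L with
  | nil => rfl
  | cons x xs ih => simp [pvDrop, h x, ih]

lemma mem_pvDrop (L : List Int) (f : Int → Int) (hf : ∀ v, 0 ≤ f v) (x : Int) :
    x ∈ pvDrop f L ↔ f x < (L.count x : Int) := by
  induction L generalizing f with
  | nil => simpa [pvDrop] using not_lt.mpr (hf x)
  | cons h t ih =>
    by_cases hp : 0 < f h
    · rw [pvDrop, if_pos hp, ih (pvDec f h) (pvDec_nonneg f h hf hp)]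
      rcases eq_or_ne x h with rfl | hxh
      · rw [List.count_cons_self, pvDec_apply, if_pos rfl]; push_cast; omega
      · rw [List.count_cons_of_ne (Ne.symm hxh), pvDec_apply, if_neg hxh]
    · rw [pvDrop, if_neg hp]
      rcases eq_or_ne x h with rfl | hxh
      · rw [List.count_cons_self]
        have h0 := hf x
        simp only [List.mem_cons, true_or]
        push_cast
        constructor
        · intro _; omega
        · intro _; trivial
      · rw [List.count_cons_of_ne (Ne.symm hxh), List.mem_cons, ih f hf]
        constructor
        · rintro (rfl | hc)
          · exact absurd rfl hxh
          · exact hc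
        · intro hc; exact Or.inr hc

lemma remove_pvDrop (L : List Int) (f : Int → Int) (x : Int) (hf : ∀ v, 0 ≤ f v)
    (hx : f x < (L.count x : Int)) :
    mdtRemove x (pvDrop f L) = pvDrop (pvInc f x) L := by
  induction L generalizing f with
  | nil => simp at hx; have := hf x; omega
  | cons h t ih =>
    by_cases hp : 0 < f h
    · have hp' : 0 < pvInc f x h := by rw [pvInc_apply]; split <;> omega
      rw [pvDrop, if_pos hp, pvDrop, if_pos hp']
      have hcomm : pvDec (pvInc f x) h = pvInc (pvDec f h) x := by
        funext y
        simp only [pvDec_apply, pvInc_apply]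
        split <;> split <;> omega
      rw [hcomm]
      apply ih (pvDec f h) (pvDec_nonneg f h hf hp)
      rcases eq_or_ne x h with rfl | hxh
      · rw [List.count_cons_self] at hx
        rw [pvDec_apply, if_pos rfl]; push_cast at hx ⊢; omega
      · rw [pvDec_apply, if_neg hxh]
        rwa [List.count_cons_of_ne (Ne.symm hxh)] at hx
    · rw [pvDrop, if_neg hp]
      rcases eq_or_ne h x with rfl | hhx
      · have hfh : f h = 0 := le_antisymm (not_lt.mp hp) (hf h)
        rw [mdtRemove, if_pos rfl, pvDrop, if_pos (by rw [pvInc_apply, if_pos rfl]; omega)]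
        have heq : pvDec (pvInc f h) h = f := by
          funext y
          simp only [pvDec_apply, pvInc_apply]
          split <;> omega
        rw [heq]
      · have hxh : x ≠ h := Ne.symm hhx
        rw [pvDrop, if_neg (by rw [pvInc_apply, if_neg hhx]; exact hp), mdtRemove, if_neg hhx]
        congr 1
        apply ih f hf
        rwa [List.count_cons_of_ne (Ne.symm hxh)] at hx

lemma pvOcc_length (L : List Int) (s v : Int) : (pvOcc s L v).length = L.count v := by
  induction L generalizing s with
  | nil => simp [pvOcc]
  | cons h t ih =>
    rcases eq_or_ne h v with rfl | hv
    · simp [pvOcc, ih, List.count_cons_self]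
    · simp [pvOcc, hv, ih, List.count_cons_of_ne hv]

lemma pvOcc_lb (L : List Int) (s v : Int) : ∀ j ∈ pvOcc s L v, s ≤ j := by
  induction L generalizing s with
  | nil => simp [pvOcc]
  | cons h t ih =>
    intro j hj
    unfold pvOcc at hj
    split at hj
    · rcases List.mem_cons.mp hj with rfl | hj
      · exact le_refl j
      · have := ih (s+1) j hj; omega
    · have := ih (s+1) j hj; omega

lemma idxOf_inj (L : List Int) (y y' : Int) (hy : y ∈ L) (hy' : y' ∈ L)
    (h : L.idxOf y = L.idxOf y') : y = y' := by
  have h1 := List.getElem_idxOf (x := y) (xs := L) (List.idxOf_lt_length_of_mem hy)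
  have h2 := List.getElem_idxOf (x := y') (xs := L) (List.idxOf_lt_length_of_mem hy')
  rw [← h1, ← h2]
  congr 1
lemma altPass_eq (xs : List Int) (rem : PySem.Dict Int Int) (acc : List Int) :
    (altPass xs rem acc).2 = acc ++ pvDrop (fun v => rem.getD v 0) xs := by
  induction xs generalizing rem acc with
  | nil => simp [altPass, pvDrop]
  | cons v vs ih =>
    rw [altPass, pvDrop]
    by_cases hk : 0 < rem.getD v 0
    · rw [if_pos hk, if_pos hk, ih]
      congr 2
      funext y
      rw [PySem.Dict.getD_insert, pvDec_apply]
      split <;> simp_all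
    · rw [if_neg hk, if_neg hk, ih]
      simp

lemma altBuildOcc_getD (L : List Int) (s : Int) (occ0 : PySem.Dict Int (List Int)) (v : Int) :
    (altBuildOcc (PySem.List.enumerate L s) occ0).getD v [] = occ0.getD v [] ++ pvOcc s L v := by
  induction L generalizing s occ0 with
  | nil => simp [PySem.List.enumerate_nil, altBuildOcc, pvOcc]
  | cons x xs ih =>
    rw [PySem.List.enumerate_cons, altBuildOcc, ih, pvOcc, PySem.Dict.getD_insert]
    rcases eq_or_ne x v with rfl | hxv
    · rw [if_pos rfl, if_pos rfl]; simp
    · rw [if_neg (Ne.symm hxv), if_neg hxv]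

lemma mem_altBuildOcc_keys (L : List Int) (s : Int) (occ0 : PySem.Dict Int (List Int)) (v : Int) :
    v ∈ (altBuildOcc (PySem.List.enumerate L s) occ0).keys ↔ v ∈ occ0.keys ∨ v ∈ L := by
  induction L generalizing s occ0 with
  | nil => simp [PySem.List.enumerate_nil, altBuildOcc]
  | cons x xs ih =>
    rw [PySem.List.enumerate_cons, altBuildOcc, ih, PySem.Dict.mem_keys_insert]
    simp only [List.mem_cons]
    tauto
lemma mdtScan_some (t tol : Int) (L : List Int) (b : Int) :
    mdtScan t tol L (some (b, |b - t|)) =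
      some (match pvFM t tol L with
        | none => (b, |b - t|)
        | some y => if |y - t| < |b - t| then (y, |y - t|) else (b, |b - t|)) := by
  induction L generalizing b with
  | nil => simp [mdtScan, pvFM]
  | cons d rest ih =>
    rw [mdtScan, pvFM]
    by_cases htol : |d - t| ≤ tol
    · by_cases himp : |d - t| < |b - t|
      · rw [if_pos (by simp [htol, himp]), ih d]
        rcases hfm : pvFM t tol rest with _ | y
        · simp [htol, himp]
        · by_cases hyd : |y - t| < |d - t|
          · simp [htol, hyd, show |y - t| < |b - t| from by omega]
          · simp [htol, hyd, himp]
      · rw [if_neg (by simp [himp]), ih b]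
        rcases hfm : pvFM t tol rest with _ | y
        · simp [htol, himp]
        · by_cases hyd : |y - t| < |d - t|
          · simp [htol, hyd]
          · simp [htol, hyd, himp, show ¬(|y - t| < |b - t|) from by omega]
    · rw [if_neg (by simp [htol]), ih b]
      simp [htol]

lemma mdtScan_none (t tol : Int) (L : List Int) :
    mdtScan t tol L none = (pvFM t tol L).map (fun y => (y, |y - t|)) := by
  cases L with
  | nil => rfl
  | cons d rest =>
    rw [mdtScan, pvFM]
    by_cases htol : |d - t| ≤ tol
    · rw [if_pos (by simp [htol]), mdtScan_some]
      rcases hfm : pvFM t tol rest with _ | y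
      · simp [htol]
      · by_cases hyd : |y - t| < |d - t| <;> simp [hyd, htol]
    · rw [if_neg (by simp [htol]), mdtScan_none]
      simp [htol]

lemma pvFM_mem (t tol : Int) (L : List Int) (y : Int) (h : pvFM t tol L = some y) :
    y ∈ L ∧ |y - t| ≤ tol := by
  induction L generalizing y with
  | nil => simp [pvFM] at h
  | cons d rest ih =>
    rw [pvFM] at h
    by_cases htol : |d - t| ≤ tol
    · rw [if_pos htol] at h
      rcases hfm : pvFM t tol rest with _ | z <;> rw [hfm] at h
      · simp only [Option.some.injEq] at h; subst h; exact ⟨List.mem_cons_self, htol⟩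
      · have hz := ih z hfm
        dsimp only at h
        by_cases hzd : |z - t| < |d - t|
        · rw [if_pos hzd] at h
          simp only [Option.some.injEq] at h
          subst h
          exact ⟨List.mem_cons_of_mem _ hz.1, hz.2⟩
        · rw [if_neg hzd] at h
          simp only [Option.some.injEq] at h
          subst h
          exact ⟨List.mem_cons_self, htol⟩
    · rw [if_neg htol] at h
      have hz := ih y h
      exact ⟨List.mem_cons_of_mem _ hz.1, hz.2⟩

lemma pvFM_none_iff (t tol : Int) (L : List Int) :
    pvFM t tol L = none ↔ ∀ x ∈ L, ¬(|x - t| ≤ tol) := by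
  induction L with
  | nil => simp [pvFM]
  | cons d rest ih =>
    rw [pvFM]
    by_cases htol : |d - t| ≤ tol
    · rw [if_pos htol]
      simp only [reduceCtorEq, false_iff]
      intro hall
      exact hall d List.mem_cons_self htol
    · rw [if_neg htol, ih]
      constructor
      · intro hall x hx
        rcases List.mem_cons.mp hx with rfl | hx
        · exact htol
        · exact hall x hx
      · intro hall x hx
        exact hall x (List.mem_cons_of_mem _ hx)

lemma pvFM_min (t tol : Int) (L : List Int) (y : Int) (h : pvFM t tol L = some y) :
    ∀ x ∈ L, |x - t| ≤ tol → |y - t| ≤ |x - t| := by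
  induction L generalizing y with
  | nil => simp [pvFM] at h
  | cons d rest ih =>
    intro x hx hxtol
    rw [pvFM] at h
    by_cases htol : |d - t| ≤ tol
    · rw [if_pos htol] at h
      rcases hfm : pvFM t tol rest with _ | z <;> rw [hfm] at h
      · simp only [Option.some.injEq] at h
        subst h
        rcases List.mem_cons.mp hx with rfl | hx
        · omega
        · have := (pvFM_none_iff t tol rest).mp hfm x hx; omega
      · have hmin := ih z hfm
        dsimp only at h
        by_cases hzd : |z - t| < |d - t|
        · rw [if_pos hzd] at h
          simp only [Option.some.injEq] at h
          subst h
          rcases List.mem_cons.mp hx with rfl | hx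
          · omega
          · exact hmin x hx hxtol
        · rw [if_neg hzd] at h
          simp only [Option.some.injEq] at h
          subst h
          rcases List.mem_cons.mp hx with rfl | hx
          · omega
          · have := hmin x hx hxtol; omega
    · rw [if_neg htol] at h
      rcases List.mem_cons.mp hx with rfl | hx
      · omega
      · exact ih y h x hx hxtol
lemma pvFM_first (t tol : Int) (L : List Int) (y : Int) (h : pvFM t tol L = some y) :
    ∀ x ∈ L, |x - t| = |y - t| → L.idxOf y ≤ L.idxOf x := by
  induction L generalizing y with
  | nil => simp [pvFM] at h
  | cons d rest ih =>
    intro x hx hxy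
    rw [pvFM] at h
    by_cases htol : |d - t| ≤ tol
    · rw [if_pos htol] at h
      rcases hfm : pvFM t tol rest with _ | z <;> rw [hfm] at h
      · simp only [Option.some.injEq] at h
        subst h; simp [List.idxOf_cons_self]
      · dsimp only at h
        by_cases hzd : |z - t| < |d - t|
        · rw [if_pos hzd] at h
          simp only [Option.some.injEq] at h
          subst h
          have hzrest := (pvFM_mem t tol rest z hfm).1
          rcases eq_or_ne z d with hzd2 | hzd2
          · rw [hzd2, List.idxOf_cons_self]; omega
          · rcases eq_or_ne x d with rfl | hxd
            · omega
            · rcases List.mem_cons.mp hx with rfl | hx2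
              · exact absurd rfl hxd
              · rw [List.idxOf_cons_ne _ (Ne.symm hzd2), List.idxOf_cons_ne _ (Ne.symm hxd)]
                have := ih z hfm x hx2 hxy
                omega
        · rw [if_neg hzd] at h
          simp only [Option.some.injEq] at h
          subst h; simp [List.idxOf_cons_self]
    · rw [if_neg htol] at h
      have hymem := pvFM_mem t tol rest y h
      have hyd : y ≠ d := by
        rintro rfl; exact htol hymem.2
      rcases eq_or_ne x d with rfl | hxd
      · rw [hxy] at htol; exact absurd hymem.2 htol
      · rcases List.mem_cons.mp hx with rfl | hx2
        · exact absurd rfl hxd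
        · rw [List.idxOf_cons_ne _ (Ne.symm hyd), List.idxOf_cons_ne _ (Ne.symm hxd)]
          have := ih y h x hx2 hxy
          omega

lemma pvFM_unique (t tol : Int) (L : List Int) (y : Int) (hy : y ∈ L) (htol : |y - t| ≤ tol)
    (hmin : ∀ x ∈ L, |x - t| ≤ tol → |y - t| ≤ |x - t|)
    (hfst : ∀ x ∈ L, |x - t| = |y - t| → L.idxOf y ≤ L.idxOf x) :
    pvFM t tol L = some y := by
  rcases hfm : pvFM t tol L with _ | z
  · exact absurd htol ((pvFM_none_iff t tol L).mp hfm y hy)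
  · have hz := pvFM_mem t tol L z hfm
    have h1 := hmin z hz.1 hz.2
    have h2 := pvFM_min t tol L z hfm y hy htol
    have heq : |z - t| = |y - t| := le_antisymm (by omega) (by omega)
    have h3 := hfst z hz.1 heq
    have h4 := pvFM_first t tol L z hfm y hy heq.symm
    have := idxOf_inj L y z hy hz.1 (le_antisymm h3 h4)
    rw [this]
lemma pvOcc_getD_mem (L : List Int) (s v : Int) (k : Nat) (hk : k < L.count v) :
    (pvOcc s L v).getD k 0 ∈ pvOcc s L v := by
  rw [List.getD_eq_getElem _ _ (by rw [pvOcc_length]; exact hk)]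
  exact List.getElem_mem _

lemma pvOcc_order (L : List Int) (f : Int → Int) (s : Int) (v1 v2 : Int)
    (hf : ∀ w, 0 ≤ f w) (h12 : v1 ≠ v2)
    (c1 : f v1 < (L.count v1 : Int)) (c2 : f v2 < (L.count v2 : Int)) :
    ((pvOcc s L v1).getD (f v1).toNat 0 < (pvOcc s L v2).getD (f v2).toNat 0 ↔
      (pvDrop f L).idxOf v1 < (pvDrop f L).idxOf v2) := by
  induction L generalizing f s with
  | nil => simp at c1; have := hf v1; omega
  | cons h t ih =>
    by_cases hp : 0 < f h
    · rw [pvDrop, if_pos hp]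
      have key : ∀ v, f v < ((h :: t).count v : Int) →
          (pvOcc s (h :: t) v).getD (f v).toNat 0 = (pvOcc (s+1) t v).getD (pvDec f h v).toNat 0 := by
        intro v _
        rw [pvOcc]
        rcases eq_or_ne h v with rfl | hv
        · rw [if_pos rfl, pvDec_apply, if_pos rfl]
          have h1 : (f h).toNat = (f h - 1).toNat + 1 := by omega
          rw [h1, List.getD_cons_succ]
        · rw [if_neg hv, pvDec_apply, if_neg (Ne.symm hv)]
      have hc : ∀ v, f v < ((h :: t).count v : Int) → pvDec f h v < (t.count v : Int) := by
        intro v hv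
        rw [pvDec_apply]
        rcases eq_or_ne v h with rfl | hvh
        · rw [if_pos rfl]; rw [List.count_cons_self] at hv; push_cast at hv ⊢; omega
        · rw [if_neg hvh]; rwa [List.count_cons_of_ne (Ne.symm hvh)] at hv
      rw [key v1 c1, key v2 c2]
      exact ih (pvDec f h) (s+1) (pvDec_nonneg f h hf hp) (hc v1 c1) (hc v2 c2)
    · have hfh : f h = 0 := le_antisymm (not_lt.mp hp) (hf h)
      rw [pvDrop, if_neg hp]
      rcases eq_or_ne h v1 with rfl | hv1
      · -- v1 at the head of the remaining list
        rw [List.idxOf_cons_self]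
        rw [List.idxOf_cons_ne _ h12]
        have hL : (pvOcc s (h :: t) h).getD (f h).toNat 0 = s := by
          rw [pvOcc, if_pos rfl, hfh]; rfl
        rw [hL, pvOcc, if_neg h12]
        have hc2 : (f v2).toNat < t.count v2 := by
          rw [List.count_cons_of_ne h12] at c2; have := hf v2; omega
        have hmem := pvOcc_getD_mem t (s+1) v2 (f v2).toNat hc2
        have := pvOcc_lb t (s+1) v2 _ hmem
        constructor
        · intro _; omega
        · intro _; omega
      · rcases eq_or_ne h v2 with rfl | hv2
        · rw [List.idxOf_cons_self, List.idxOf_cons_ne _ (Ne.symm h12)]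
          have hL : (pvOcc s (h :: t) h).getD (f h).toNat 0 = s := by
            rw [pvOcc, if_pos rfl, hfh]; rfl
          rw [hL, pvOcc, if_neg (Ne.symm h12)]
          have hc1 : (f v1).toNat < t.count v1 := by
            rw [List.count_cons_of_ne hv1] at c1; have := hf v1; omega
          have hmem := pvOcc_getD_mem t (s+1) v1 (f v1).toNat hc1
          have := pvOcc_lb t (s+1) v1 _ hmem
          constructor
          · intro hcon; omega
          · intro hcon; omega
        · rw [pvOcc, if_neg hv1, pvOcc, if_neg hv2,
            List.idxOf_cons_ne _ hv1, List.idxOf_cons_ne _ hv2]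
          rw [List.count_cons_of_ne hv1] at c1
          rw [List.count_cons_of_ne hv2] at c2
          rw [ih f (s+1) hf c1 c2]
          omega
lemma altPick_eq (tol t : Int) (detected : List Int) (occ : PySem.Dict Int (List Int))
    (used : PySem.Dict Int Int) (vals : List Int) (f : Int → Int)
    (hocc : ∀ v, occ.getD v [] = pvOcc 0 detected v)
    (hused : ∀ v, used.getD v 0 = f v)
    (hf : ∀ v, 0 ≤ f v)
    (hvals : vals.Pairwise (· < ·))
    (hmem : ∀ v, v ∈ vals ↔ f v < (detected.count v : Int)) :
    altPick tol t occ used vals = pvFM t tol (pvDrop f detected) := by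
  unfold altPick
  have hle : vals.Pairwise (· ≤ ·) := hvals.imp (fun {a b} h => le_of_lt h)
  obtain ⟨hposlen, hbelow, habove⟩ := PySem.List.bisectLeft_spec vals t hle
  set pos := PySem.List.bisectLeft vals t with hposdef
  have hmono := List.pairwise_iff_getElem.mp hvals
  have hmemL : ∀ v, v ∈ pvDrop f detected ↔ v ∈ vals := fun v => by
    rw [mem_pvDrop detected f hf v, hmem v]
  have hfidx : ∀ v, altFIdx occ used v = (pvOcc 0 detected v).getD (f v).toNat 0 := by
    intro v; rw [altFIdx, hocc, hused]
  have horder : ∀ v1 v2, v1 ∈ vals → v2 ∈ vals → v1 ≠ v2 →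
      (altFIdx occ used v1 < altFIdx occ used v2 ↔
        (pvDrop f detected).idxOf v1 < (pvDrop f detected).idxOf v2) := by
    intro v1 v2 h1 h2 h12
    rw [hfidx, hfidx]
    exact pvOcc_order detected f 0 v1 v2 hf h12 ((hmem v1).mp h1) ((hmem v2).mp h2)
  have habs1 : ∀ v : Int, v < t → |v - t| = t - v := fun v hv => by
    rw [abs_of_neg (by omega)]; ring
  have habs2 : ∀ v : Int, t ≤ v → |v - t| = v - t := fun v hv => abs_of_nonneg (by omega)
  have hsideLow : ∀ v ∈ vals, v < t → 0 < pos ∧ v ≤ vals.getD (pos - 1) 0 := by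
    intro v hv hvt
    obtain ⟨j, hj, rfl⟩ := List.mem_iff_getElem.mp hv
    have hjpos : j < pos := by
      by_contra hcon
      have := habove j hj (by omega)
      omega
    refine ⟨by omega, ?_⟩
    have hp1 : pos - 1 < vals.length := by omega
    rw [List.getD_eq_getElem _ _ hp1]
    rcases eq_or_lt_of_le (by omega : j ≤ pos - 1) with heq | hlt
    · subst heq; exact le_refl _
    · exact le_of_lt (hmono j _ hj hp1 hlt)
  have hsideHigh : ∀ v ∈ vals, t ≤ v → pos < vals.length ∧ vals.getD pos 0 ≤ v := by
    intro v hv hvt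
    obtain ⟨j, hj, rfl⟩ := List.mem_iff_getElem.mp hv
    have hjpos : pos ≤ j := by
      by_contra hcon
      have := hbelow j hj (by omega)
      omega
    refine ⟨by omega, ?_⟩
    rw [List.getD_eq_getElem _ _ (by omega)]
    rcases eq_or_lt_of_le hjpos with heq | hlt
    · subst heq; exact le_refl _
    · exact le_of_lt (hmono _ j (by omega) hj hlt)
  have hlo_mem : 0 < pos → vals.getD (pos - 1) 0 ∈ vals := by
    intro h0
    rw [List.getD_eq_getElem _ _ (by omega)]
    exact List.getElem_mem _
  have hhi_mem : pos < vals.length → vals.getD pos 0 ∈ vals := by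
    intro h0
    rw [List.getD_eq_getElem _ _ h0]
    exact List.getElem_mem _
  have hlo_lt : 0 < pos → vals.getD (pos - 1) 0 < t := by
    intro h0
    rw [List.getD_eq_getElem _ _ (by omega)]
    exact hbelow _ _ (by omega)
  have hhi_ge : pos < vals.length → t ≤ vals.getD pos 0 := by
    intro h0
    rw [List.getD_eq_getElem _ _ h0]
    exact habove _ _ (le_refl _)
  by_cases hpos0 : 0 < pos
  · rw [if_pos hpos0]
    set lo := vals.getD (pos - 1) 0 with hlodef
    have hlot := hlo_lt hpos0
    have hlom := hlo_mem hpos0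
    by_cases hhiC : pos < vals.length ∧ |vals.getD pos 0 - t| ≤ tol
    · set hi := vals.getD pos 0 with hhidef
      have hhim := hhi_mem hhiC.1
      have hhit := hhi_ge hhiC.1
      have hlohi : lo ≠ hi := by omega
      rw [if_pos hhiC]
      by_cases hcond : |lo - t| ≤ tol ∧ (|lo - t| < |hi - t| ∨ (|lo - t| = |hi - t| ∧ altFIdx occ used lo < altFIdx occ used hi))
      · rw [if_pos (by
          simp only [Bool.and_eq_true, Bool.or_eq_true, decide_eq_true_eq]
          exact ⟨hcond.1, hcond.2⟩)]
        refine (pvFM_unique t tol _ lo ((hmemL lo).mpr hlom) hcond.1 ?_ ?_).symm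
        · intro x hx hxtol
          have hxv := (hmemL x).mp hx
          rcases lt_or_ge x t with hxt | hxt
          · have := (hsideLow x hxv hxt).2
            rw [habs1 x hxt, habs1 lo hlot]
            omega
          · have := (hsideHigh x hxv hxt).2
            have h2 : |lo - t| ≤ |hi - t| := by rcases hcond.2 with h | h <;> omega
            rw [habs2 x hxt]
            rw [habs2 hi hhit] at h2
            omega
        · intro x hx hxd
          have hxv := (hmemL x).mp hx
          rcases eq_or_ne x lo with rfl | hxlo
          · exact le_refl _
          · rcases lt_or_ge x t with hxt | hxt
            · have := (hsideLow x hxv hxt).2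
              rw [habs1 x hxt, habs1 lo hlot] at hxd
              omega
            · -- x is on the high side with equal distance: x = hi and the tie-break fired
              have hxhi : x = hi := by
                have h1 := (hsideHigh x hxv hxt).2
                have h2 : |lo - t| ≤ |hi - t| := by
                  rcases hcond.2 with h | h
                  · exact le_of_lt h
                  · exact le_of_eq h.1
                rw [habs2 x hxt] at hxd
                rw [habs2 hi hhit] at h2
                rw [habs1 lo hlot] at hxd h2
                omega
              rw [hxhi]
              rw [hxhi] at hxd
              rcases hcond.2 with h | h
              · omega
              · exact le_of_lt ((horder lo hi hlom hhim hlohi).mp h.2)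
      · rw [if_neg (by
          simp only [Bool.and_eq_true, Bool.or_eq_true, decide_eq_true_eq]
          intro hcc
          exact hcond hcc)]
        have hhitol := hhiC.2
        refine (pvFM_unique t tol _ hi ((hmemL hi).mpr hhim) hhitol ?_ ?_).symm
        · intro x hx hxtol
          have hxv := (hmemL x).mp hx
          rcases lt_or_ge x t with hxt | hxt
          · have hxlo := (hsideLow x hxv hxt).2
            by_cases hlotol : |lo - t| ≤ tol
            · have himp : ¬(|lo - t| < |hi - t|) := fun hcc => hcond ⟨hlotol, Or.inl hcc⟩
              rw [habs1 x hxt]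
              rw [habs1 lo hlot] at himp
              omega
            · rw [habs1 x hxt] at hxtol
              rw [habs1 lo hlot] at hlotol
              omega
          · have := (hsideHigh x hxv hxt).2
            rw [habs2 x hxt, habs2 hi hhit]
            omega
        · intro x hx hxd
          have hxv := (hmemL x).mp hx
          rcases eq_or_ne x hi with rfl | hxhi
          · exact le_refl _
          · rcases lt_or_ge x t with hxt | hxt
            · -- x on the low side: x = lo, and the tie-break refused lo
              have hxtol : |x - t| ≤ tol := by rw [hxd]; exact hhitol
              have hlotol : |lo - t| ≤ tol := by
                have := (hsideLow x hxv hxt).2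
                rw [habs1 x hxt] at hxtol
                rw [habs1 lo hlot]
                omega
              have himp : ¬(|lo - t| < |hi - t|) := fun hcc => hcond ⟨hlotol, Or.inl hcc⟩
              have hxlo : x = lo := by
                have := (hsideLow x hxv hxt).2
                rw [habs1 x hxt, habs2 hi hhit] at hxd
                rw [habs1 lo hlot] at himp
                rw [habs2 hi hhit] at himp
                omega
              rw [hxlo]
              rw [hxlo] at hxd
              have heq2 : |lo - t| = |hi - t| := by omega
              have hnf : ¬(altFIdx occ used lo < altFIdx occ used hi) := fun hcc =>
                hcond ⟨hlotol, Or.inr ⟨heq2, hcc⟩⟩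
              have := (horder lo hi hlom hhim (by omega)).not.mp hnf
              omega
            · have := (hsideHigh x hxv hxt).2
              rw [habs2 x hxt, habs2 hi hhit] at hxd
              omega
    · rw [if_neg hhiC]
      by_cases hlotol : |lo - t| ≤ tol
      · rw [if_pos (by simp [hlotol])]
        refine (pvFM_unique t tol _ lo ((hmemL lo).mpr hlom) hlotol ?_ ?_).symm
        · intro x hx hxtol
          have hxv := (hmemL x).mp hx
          rcases lt_or_ge x t with hxt | hxt
          · have := (hsideLow x hxv hxt).2
            rw [habs1 x hxt, habs1 lo hlot]
            omega
          · exfalso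
            obtain ⟨hpl, hge⟩ := hsideHigh x hxv hxt
            have hhit := hhi_ge hpl
            have : ¬(|vals.getD pos 0 - t| ≤ tol) := fun hcc => hhiC ⟨hpl, hcc⟩
            rw [habs2 _ hhit] at this
            rw [habs2 x hxt] at hxtol
            omega
        · intro x hx hxd
          have hxv := (hmemL x).mp hx
          rcases eq_or_ne x lo with rfl | hxlo
          · exact le_refl _
          · rcases lt_or_ge x t with hxt | hxt
            · have := (hsideLow x hxv hxt).2
              rw [habs1 x hxt, habs1 lo hlot] at hxd
              omega
            · exfalso
              obtain ⟨hpl, hge⟩ := hsideHigh x hxv hxt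
              have hhit := hhi_ge hpl
              have hno : ¬(|vals.getD pos 0 - t| ≤ tol) := fun hcc => hhiC ⟨hpl, hcc⟩
              rw [habs2 _ hhit] at hno
              rw [habs2 x hxt, habs1 lo hlot] at hxd
              rw [habs1 lo hlot] at hlotol
              omega
      · rw [if_neg (by simp [hlotol])]
        symm
        rw [pvFM_none_iff]
        intro x hx hxtol
        have hxv := (hmemL x).mp hx
        rcases lt_or_ge x t with hxt | hxt
        · have := (hsideLow x hxv hxt).2
          rw [habs1 x hxt] at hxtol
          rw [habs1 lo hlot] at hlotol
          omega
        · obtain ⟨hpl, hge⟩ := hsideHigh x hxv hxt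
          have hhit := hhi_ge hpl
          have hno : ¬(|vals.getD pos 0 - t| ≤ tol) := fun hcc => hhiC ⟨hpl, hcc⟩
          rw [habs2 _ hhit] at hno
          rw [habs2 x hxt] at hxtol
          omega
  · rw [if_neg hpos0]
    have hpz : pos = 0 := by omega
    by_cases hhiC : pos < vals.length ∧ |vals.getD pos 0 - t| ≤ tol
    · set hi := vals.getD pos 0 with hhidef
      have hhim := hhi_mem hhiC.1
      have hhit := hhi_ge hhiC.1
      rw [if_pos hhiC]
      refine (pvFM_unique t tol _ hi ((hmemL hi).mpr hhim) hhiC.2 ?_ ?_).symm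
      · intro x hx hxtol
        have hxv := (hmemL x).mp hx
        rcases lt_or_ge x t with hxt | hxt
        · have := (hsideLow x hxv hxt).1
          omega
        · have := (hsideHigh x hxv hxt).2
          rw [habs2 x hxt, habs2 hi hhit]
          omega
      · intro x hx hxd
        have hxv := (hmemL x).mp hx
        rcases lt_or_ge x t with hxt | hxt
        · have := (hsideLow x hxv hxt).1
          omega
        · have := (hsideHigh x hxv hxt).2
          have : x = hi := by
            rw [habs2 x hxt, habs2 hi hhit] at hxd
            omega
          subst this
          exact le_refl _
    · rw [if_neg hhiC]
      symm
      rw [pvFM_none_iff]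
      intro x hx hxtol
      have hxv := (hmemL x).mp hx
      rcases lt_or_ge x t with hxt | hxt
      · have := (hsideLow x hxv hxt).1
        omega
      · obtain ⟨hpl, hge⟩ := hsideHigh x hxv hxt
        have hhit := hhi_ge hpl
        have hno : ¬(|vals.getD pos 0 - t| ≤ tol) := fun hcc => hhiC ⟨hpl, hcc⟩
        rw [habs2 _ hhit] at hno
        rw [habs2 x hxt] at hxtol
        omega
lemma loop_eq (tol : Int) (detected true_points : List Int) (occ : PySem.Dict Int (List Int))
    (hocc : ∀ v, occ.getD v [] = pvOcc 0 detected v) :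
    ∀ (ts : List Int) (pre : List Int) (ms : List (Int × Int))
      (used taken : PySem.Dict Int Int) (vals : List Int),
      true_points = pre ++ ts →
      (∀ v, 0 ≤ used.getD v 0) →
      (∀ v, 0 ≤ taken.getD v 0) →
      (∀ v, taken.getD v 0 ≤ (pre.count v : Int)) →
      vals.Pairwise (· < ·) →
      (∀ v, v ∈ vals ↔ used.getD v 0 < (detected.count v : Int)) →
      mdtLoop tol ts ms (pvDrop (fun v => used.getD v 0) detected) (pvDrop (fun v => taken.getD v 0) true_points)
        = (match altLoop tol occ ts ms used taken vals with
            | (ms', used', taken', _) =>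
              (ms', pvDrop (fun v => used'.getD v 0) detected, pvDrop (fun v => taken'.getD v 0) true_points)) := by
  intro ts
  induction ts with
  | nil =>
    intro pre ms used taken vals _ _ _ _ _ _
    rw [mdtLoop, altLoop]
  | cons t ts ih =>
    intro pre ms used taken vals hsplit hU0 hT0 hTb hvals hmemv
    have hb' := altPick_eq tol t detected occ used vals (fun v => used.getD v 0) hocc
      (fun v => rfl) hU0 hvals hmemv
    rw [mdtLoop, altLoop, hb', mdtScan_none]
    rcases hb : pvFM t tol (pvDrop (fun v => used.getD v 0) detected) with _ | b <;>
      simp only [Option.map_none, Option.map_some]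
    · exact ih (pre ++ [t]) ms used taken vals (by rw [hsplit]; simp) hU0 hT0
        (fun v => by
          rw [List.count_append]
          have := hTb v
          push_cast
          omega) hvals hmemv
    · have hbud := (pvFM_mem t tol _ b hb).1
      have hbcnt : used.getD b 0 < (detected.count b : Int) :=
        (mem_pvDrop detected _ hU0 b).mp hbud
      have hbvals : b ∈ vals := (hmemv b).mpr hbcnt
      have htcnt : taken.getD t 0 < (true_points.count t : Int) := by
        rw [hsplit, List.count_append, List.count_cons_self]
        have := hTb t
        push_cast
        omega
      have hnodup : vals.Nodup := hvals.imp (fun h => ne_of_lt h)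
      have hlen : ((occ.getD b []).length : Int) = (detected.count b : Int) := by
        rw [hocc b, pvOcc_length]
      have hudeq : (fun v => (used.insert b (used.getD b 0 + 1)).getD v 0)
          = pvInc (fun v => used.getD v 0) b := by
        funext v
        rw [PySem.Dict.getD_insert, pvInc_apply]
        split
        · rename_i hvb; subst hvb; rfl
        · rfl
      have htkeq : (fun v => (taken.insert t (taken.getD t 0 + 1)).getD v 0)
          = pvInc (fun v => taken.getD v 0) t := by
        funext v
        rw [PySem.Dict.getD_insert, pvInc_apply]
        split
        · rename_i hvb; subst hvb; rfl
        · rfl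
      have hU0' : ∀ v, 0 ≤ (used.insert b (used.getD b 0 + 1)).getD v 0 := by
        intro v
        rw [PySem.Dict.getD_insert]
        split
        · have := hU0 b; omega
        · exact hU0 v
      have hT0' : ∀ v, 0 ≤ (taken.insert t (taken.getD t 0 + 1)).getD v 0 := by
        intro v
        rw [PySem.Dict.getD_insert]
        split
        · have := hT0 t; omega
        · exact hT0 v
      have hTb' : ∀ v, (taken.insert t (taken.getD t 0 + 1)).getD v 0 ≤ ((pre ++ [t]).count v : Int) := by
        intro v
        rw [PySem.Dict.getD_insert, List.count_append]
        split
        · rename_i hvt; subst hvt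
          have := hTb v
          simp
          omega
        · have := hTb v
          push_cast
          omega
      rw [remove_pvDrop detected _ b hU0 hbcnt, remove_pvDrop true_points _ t hT0 htcnt]
      by_cases hrem : used.getD b 0 + 1 = ((occ.getD b []).length : Int)
      · rw [if_pos hrem, PySem.List.remove?_eq_some_erase vals b hbvals]
        have hvals' : (vals.erase b).Pairwise (· < ·) :=
          List.Pairwise.sublist (List.erase_sublist) hvals
        have hmemv' : ∀ v, v ∈ vals.erase b ↔
            (used.insert b (used.getD b 0 + 1)).getD v 0 < (detected.count v : Int) := by
          intro v
          rw [List.Nodup.mem_erase_iff hnodup, PySem.Dict.getD_insert]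
          rcases eq_or_ne v b with rfl | hvb
          · rw [if_pos rfl]
            simp only [ne_eq, not_true_eq_false, false_and, false_iff, not_lt]
            omega
          · rw [if_neg hvb]
            simp only [ne_eq, hvb, not_false_eq_true, true_and]
            exact hmemv v
        have := ih (pre ++ [t]) (ms ++ [(t, b)]) (used.insert b (used.getD b 0 + 1))
          (taken.insert t (taken.getD t 0 + 1)) (vals.erase b)
          (by rw [hsplit]; simp) hU0' hT0' hTb' hvals' hmemv'
        rw [hudeq, htkeq] at this
        exact this
      · rw [if_neg hrem]
        have hmemv' : ∀ v, v ∈ vals ↔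
            (used.insert b (used.getD b 0 + 1)).getD v 0 < (detected.count v : Int) := by
          intro v
          rw [PySem.Dict.getD_insert]
          rcases eq_or_ne v b with rfl | hvb
          · rw [if_pos rfl]
            rw [hlen] at hrem
            constructor
            · intro _; omega
            · intro _; exact hbvals
          · rw [if_neg hvb]
            exact hmemv v
        have := ih (pre ++ [t]) (ms ++ [(t, b)]) (used.insert b (used.getD b 0 + 1))
          (taken.insert t (taken.getD t 0 + 1)) vals
          (by rw [hsplit]; simp) hU0' hT0' hTb' hvals hmemv'
        rw [hudeq, htkeq] at this
        exact this
lemma altBuildOcc_nodup_keys : ∀ (ps : List (Int × Int)) (occ0 : PySem.Dict Int (List Int)),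
    occ0.keys.Nodup → (altBuildOcc ps occ0).keys.Nodup := by
  intro ps
  induction ps with
  | nil => intro occ0 h; exact h
  | cons p rest ih =>
    rcases p with ⟨i, v⟩
    intro occ0 h
    exact ih _ (PySem.Dict.nodup_keys_insert _ _ _ h)

lemma pairwise_lt_of_le_nodup (l : List Int) (h1 : l.Pairwise (· ≤ ·)) (h2 : l.Nodup) :
    l.Pairwise (· < ·) := by
  induction l with
  | nil => exact List.Pairwise.nil
  | cons x xs ih =>
    rw [List.pairwise_cons] at h1 ⊢
    rw [List.nodup_cons] at h2
    refine ⟨fun y hy => lt_of_le_of_ne (h1.1 y hy) ?_, ih h1.2 h2.2⟩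
    rintro rfl
    exact h2.1 hy

lemma mdt_eq_alt : ∀ (detected true_points : List Int) (tolerance : Int),
    match_detected_to_true detected true_points tolerance = match_detected_to_true_alt detected true_points tolerance := by
  intro detected true_points tolerance
  unfold match_detected_to_true match_detected_to_true_alt
  dsimp only
  set occ := altBuildOcc (PySem.List.enumerate detected 0) PySem.Dict.empty with hoccdef
  set vals0 := PySem.List.sorted occ.keys (fun x => x) false with hvalsdef
  have hocc : ∀ v, occ.getD v [] = pvOcc 0 detected v := by
    intro v
    rw [hoccdef, altBuildOcc_getD, PySem.Dict.getD_empty]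
    simp
  have h0 : ∀ v : Int, (PySem.Dict.empty.getD v (0 : Int)) = 0 := fun v =>
    PySem.Dict.getD_empty v 0
  have hkeysnodup : occ.keys.Nodup := by
    rw [hoccdef]
    apply altBuildOcc_nodup_keys
    simp [PySem.Dict.keys_empty]
  have hsortnodup : vals0.Nodup := by
    rw [hvalsdef]
    exact ((PySem.List.sorted_perm occ.keys (fun x => x) false).nodup_iff).mpr hkeysnodup
  have hvals : vals0.Pairwise (· < ·) :=
    pairwise_lt_of_le_nodup vals0 (PySem.List.sorted_pairwise occ.keys (fun x => x)) hsortnodup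
  have hmem0 : ∀ v, v ∈ vals0 ↔ (PySem.Dict.empty.getD v (0 : Int)) < (detected.count v : Int) := by
    intro v
    rw [h0 v, hvalsdef, PySem.List.mem_sorted, hoccdef, mem_altBuildOcc_keys]
    simp [PySem.Dict.keys_empty, List.count_pos_iff]
  have hmain := loop_eq tolerance detected true_points occ hocc true_points [] []
    PySem.Dict.empty PySem.Dict.empty vals0 (by simp) (by simp [h0]) (by simp [h0])
    (by intro v; rw [h0 v]; simp) hvals hmem0
  rw [pvDrop_zero detected _ h0, pvDrop_zero true_points _ h0] at hmain
  rw [hmain]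
  rcases hq : altLoop tolerance occ true_points [] PySem.Dict.empty PySem.Dict.empty vals0 with ⟨ms, u, tk, vv⟩
  simp [altPass_eq]

-- ===== VERDICT (by name: the statement is the Claim_ definition above) =====
theorem match_detected_to_true_spec : Claim_equal_match_detected_to_true := by
  intro detected true_points tolerance _
  unfold Spec_match_detected_to_true
  exact mdt_eq_alt detected true_points tolerance
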